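-- pv_equiv track=rewrite | github.com/Yudbay1809/app | api/device.py | _normalize_media_id_set
-- ===== SOURCE A (Python) =====
-- def _normalize_media_id_set(values: list[str] | None) -> list[str]:
--     if not values:
--         return []
--     normalized: set[str] = set()
--     for item in values:
--         value = str(item or "").strip()
--         if value:
--             normalized.add(value)
--     return sorted(normalized)
-- ===== SOURCE B (Python) =====
-- def _normalize_media_id_set(values: list[str] | None) -> list[str]:
--     if not values:
--         return []
--     cleaned = [str(item or "").strip() for item in values]
--     cleaned = [v for v in cleaned if v]
--     cleaned.sort()
--     out: list[str] = []
--     prev = None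
--     for v in cleaned:
--         if v != prev:
--             out.append(v)
--             prev = v
--     return out
-- ===== Notes on version B (the rewrite author's own statement) =====
-- stated objective: alternative
-- what changed: Replaces the hash-set dedup followed by sorted() with a filter+sort of all normalized strings and a single adjacency scan (prev sentinel) that drops duplicates of the sorted list.
import Mathlib
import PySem

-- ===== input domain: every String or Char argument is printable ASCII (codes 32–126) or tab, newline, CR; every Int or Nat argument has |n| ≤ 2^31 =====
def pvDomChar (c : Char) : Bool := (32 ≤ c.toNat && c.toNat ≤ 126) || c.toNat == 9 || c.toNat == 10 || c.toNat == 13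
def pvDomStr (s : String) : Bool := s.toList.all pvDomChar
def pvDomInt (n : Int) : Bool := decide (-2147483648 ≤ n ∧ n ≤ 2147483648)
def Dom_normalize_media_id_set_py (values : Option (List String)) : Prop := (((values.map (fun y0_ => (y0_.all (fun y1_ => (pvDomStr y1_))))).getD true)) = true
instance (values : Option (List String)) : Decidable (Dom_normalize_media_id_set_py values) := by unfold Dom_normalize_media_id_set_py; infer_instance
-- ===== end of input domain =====

-- B replaces A's hash-set dedup + sorted() by filter+sort of the normalized strings and one
-- adjacency scan with a prev sentinel that drops duplicates; same results, same O(n log n) cost.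


-- ===== PORT A =====
-- 'if not values: return []'; then a set built in a for loop ('str(item or "")' is
-- 'if item = "" then "" else item' since item is already a str), then sorted(normalized).
def normalize_media_id_set_py (values : Option (List String)) : List String :=
  match values with
  | none => []
  | some vs =>
    if vs = [] then []
    else
      let normalized : PySem.Set String :=
        vs.foldl (fun acc item =>
          let value := PySem.Str.strip (if item = "" then "" else item)
          if value ≠ "" then PySem.Set.add acc value else acc) PySem.Set.empty
      PySem.List.sorted normalized (fun x => x) false

-- ===== PORT B =====
-- the 'for v in cleaned: if v != prev: out.append(v); prev = v' loop, state (out, prev)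
def pvAdjLoop (cleaned : List String) (st : List String × Option String) : List String × Option String :=
  cleaned.foldl (fun st v => if some v ≠ st.2 then (st.1 ++ [v], some v) else st) st

def normalize_media_id_set_py_alt (values : Option (List String)) : List String :=
  match values with
  | none => []
  | some vs =>
    if vs = [] then []
    else
      let cleaned0 := vs.map (fun item => PySem.Str.strip (if item = "" then "" else item))
      let cleaned1 := cleaned0.filter (fun v => v ≠ "")
      let cleaned := PySem.List.sorted cleaned1 (fun x => x) false
      (pvAdjLoop cleaned ([], none)).1

-- ===== PRECONDITION & SPEC =====
def Spec_normalize_media_id_set_py (values : Option (List String)) (out : List String) : Prop := out = normalize_media_id_set_py_alt values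
instance (values : Option (List String)) (out : List String) : Decidable (Spec_normalize_media_id_set_py values out) := by unfold Spec_normalize_media_id_set_py; infer_instance

-- ===== CLAIM (what is proved, stated in full; the proofs are below) =====
def Claim_equal_normalize_media_id_set_py : Prop := ∀ (values : Option (List String)), Dom_normalize_media_id_set_py values → Spec_normalize_media_id_set_py values (normalize_media_id_set_py values)

-- ===== LEMMAS AND PROOFS =====

-- the adjacency loop as structural recursion on the list
def pvDedupAdj (l : List String) (prev : Option String) : List String :=
  match l with
  | [] => []
  | v :: rest => if some v ≠ prev then v :: pvDedupAdj rest (some v) else pvDedupAdj rest prev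

theorem pvAdjLoop_eq_dedupAdj (l : List String) (out : List String) (prev : Option String) :
    pvAdjLoop l (out, prev) = (out ++ pvDedupAdj l prev,
      (pvDedupAdj l prev).getLast?.elim prev some) := by
  induction l generalizing out prev with
  | nil => simp [pvAdjLoop, pvDedupAdj]
  | cons v rest ih =>
    by_cases h : some v = prev
    · have step : pvAdjLoop (v :: rest) (out, prev) = pvAdjLoop rest (out, prev) := by
        simp [pvAdjLoop, h]
      have hd : pvDedupAdj (v :: rest) prev = pvDedupAdj rest prev := by
        simp [pvDedupAdj, h]
      rw [step, ih, hd]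
    · have step : pvAdjLoop (v :: rest) (out, prev) = pvAdjLoop rest (out ++ [v], some v) := by
        simp [pvAdjLoop, h]
      have hd : pvDedupAdj (v :: rest) prev = v :: pvDedupAdj rest (some v) := by
        simp [pvDedupAdj, h]
      rw [step, ih, hd]
      cases hdd : pvDedupAdj rest (some v) with
      | nil => simp
      | cons a t =>
        have hne : (a :: t).getLast? ≠ none := by simp
        cases hgl : (a :: t).getLast? with
        | none => exact absurd hgl hne
        | some b => simp [hgl]

-- spec of the adjacency dedup on a ≤-sorted list, with lower bound p on all elements
theorem pvDedupAdj_spec (l : List String) (p : String)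
    (hs : l.Pairwise (· ≤ ·)) (hb : ∀ x ∈ l, p ≤ x) :
    (pvDedupAdj l (some p)).Pairwise (· < ·) ∧
    (∀ x, x ∈ pvDedupAdj l (some p) ↔ x ∈ l ∧ x ≠ p) ∧
    (∀ x ∈ pvDedupAdj l (some p), p < x) := by
  induction l generalizing p with
  | nil => simp [pvDedupAdj]
  | cons v rest ih =>
    rcases List.pairwise_cons.mp hs with ⟨hvr, hrest⟩
    by_cases h : v = p
    · subst h
      obtain ⟨h1, h2, h3⟩ := ih v hrest hvr
      have hstep : pvDedupAdj (v :: rest) (some v) = pvDedupAdj rest (some v) := by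
        simp [pvDedupAdj]
      refine ⟨by rw [hstep]; exact h1, fun x => ?_, by rw [hstep]; exact h3⟩
      rw [hstep, h2 x, List.mem_cons]
      constructor
      · rintro ⟨hx, hne⟩; exact ⟨Or.inr hx, hne⟩
      · rintro ⟨rfl | hx, hne⟩
        · exact absurd rfl hne
        · exact ⟨hx, hne⟩
    · have hpv : p < v := lt_of_le_of_ne (hb v List.mem_cons_self) (fun e => h e.symm)
      obtain ⟨h1, h2, h3⟩ := ih v hrest hvr
      have hstep : pvDedupAdj (v :: rest) (some p) = v :: pvDedupAdj rest (some v) := by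
        simp [pvDedupAdj, h]
      refine ⟨?_, fun x => ?_, ?_⟩
      · rw [hstep]; exact List.pairwise_cons.mpr ⟨h3, h1⟩
      · rw [hstep]
        simp only [List.mem_cons]
        constructor
        · rintro (rfl | hx)
          · exact ⟨Or.inl rfl, h⟩
          · obtain ⟨hxr, hxv⟩ := (h2 x).mp hx
            refine ⟨Or.inr hxr, fun e => ?_⟩
            subst e
            exact h (le_antisymm (hvr x hxr) (hb v List.mem_cons_self))
        · rintro ⟨rfl | hx, hne⟩
          · exact Or.inl rfl
          · by_cases hxv : x = v
            · exact Or.inl hxv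
            · exact Or.inr ((h2 x).mpr ⟨hx, hxv⟩)
      · rw [hstep]
        rintro x hx
        rcases List.mem_cons.mp hx with rfl | hx'
        · exact hpv
        · exact lt_trans hpv (h3 x hx')

theorem pvDedupAdj_none (l : List String) (hs : l.Pairwise (· ≤ ·)) :
    (pvDedupAdj l none).Pairwise (· < ·) ∧ (∀ x, x ∈ pvDedupAdj l none ↔ x ∈ l) := by
  cases l with
  | nil => simp [pvDedupAdj]
  | cons v rest =>
    rcases List.pairwise_cons.mp hs with ⟨hvr, hrest⟩
    obtain ⟨h1, h2, h3⟩ := pvDedupAdj_spec rest v hrest hvr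
    have hstep : pvDedupAdj (v :: rest) none = v :: pvDedupAdj rest (some v) := by
      simp [pvDedupAdj]
    refine ⟨by rw [hstep]; exact List.pairwise_cons.mpr ⟨h3, h1⟩, fun x => ?_⟩
    rw [hstep]
    simp only [List.mem_cons]
    constructor
    · rintro (rfl | hx)
      · exact Or.inl rfl
      · exact Or.inr ((h2 x).mp hx).1
    · rintro (rfl | hx)
      · exact Or.inl rfl
      · by_cases hxv : x = v
        · exact Or.inl hxv
        · exact Or.inr ((h2 x).mpr ⟨hx, hxv⟩)

-- A's set-building loop computes set(cleaned) for B's cleaned list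
theorem pvSetLoop_eq (vs : List String) :
    vs.foldl (fun acc item =>
        let value := PySem.Str.strip (if item = "" then "" else item)
        if value ≠ "" then PySem.Set.add acc value else acc) PySem.Set.empty
    = PySem.Set.ofList
        (((vs.map (fun item => PySem.Str.strip (if item = "" then "" else item))).filter
          (fun v => v ≠ ""))) := by
  rw [PySem.Set.ofList_eq_foldl, ← PySem.List.foldl_ite_eq_foldl_filter
        (p := fun v => v ≠ "") (f := PySem.Set.add), List.foldl_map]
  rfl

theorem pv_main (values : Option (List String)) :
    normalize_media_id_set_py values = normalize_media_id_set_py_alt values := by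
  cases values with
  | none => rfl
  | some vs =>
    by_cases hvs : vs = []
    · simp [normalize_media_id_set_py, normalize_media_id_set_py_alt, hvs]
    · simp only [normalize_media_id_set_py, normalize_media_id_set_py_alt, hvs]
      set cleaned1 := (vs.map (fun item => PySem.Str.strip (if item = "" then "" else item))).filter
          (fun v => v ≠ "") with hc1
      rw [pvSetLoop_eq, pvAdjLoop_eq_dedupAdj]
      simp only [List.nil_append]
      have hs : (PySem.List.sorted cleaned1 (fun x => x) false).Pairwise (· ≤ ·) :=
        PySem.List.sorted_pairwise cleaned1 (fun x => x)
      obtain ⟨hlt, hmem⟩ := pvDedupAdj_none _ hs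
      simp only [if_false]
      rw [← hc1]
      refine PySem.List.sorted_eq_of_perm_of_pairwise_lt _ _ _ ?_ hlt
      have hnd1 : (pvDedupAdj (PySem.List.sorted cleaned1 (fun x => x) false) none).Nodup :=
        hlt.imp ne_of_lt
      have hnd2 : (PySem.Set.ofList cleaned1).Nodup := PySem.Set.nodup_ofList cleaned1
      rw [List.perm_ext_iff_of_nodup hnd1 hnd2]
      intro a
      rw [hmem a, PySem.List.mem_sorted, PySem.Set.mem_ofList]

-- ===== VERDICT (by name: the statement is the Claim_ definition above) =====
theorem normalize_media_id_set_py_spec : Claim_equal_normalize_media_id_set_py := by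
  intro values _
  exact (pv_main values).symm ▸ rfl
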